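-- pv_equiv track=rewrite | github.com/NathanMacDiarmid/SYSC4810 | Encrypt.py | checkForCalendar
-- ===== SOURCE A (Python) =====
-- def checkForCalendar(passwd) -> bool:
--     numberCount = 0
--     curr = 0
--     prev = 0
--     for elem in passwd:
--         if (elem.isnumeric()):
--             numberCount += 1
--         elif (passwd[curr].isnumeric() and passwd[prev].isnumeric() and numberCount > 0):
--             numberCount += 1
--         elif (numberCount != 6):
--             numberCount = 0
--         if (numberCount >= 6):
--             return False
--         curr += 1
--         prev = curr - 1
--     return True
-- ===== SOURCE B (Python) =====
-- def checkForCalendar(passwd) -> bool: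
--     s = passwd
--     while len(s) >= 6:
--         if s[:6].isnumeric():
--             return False
--         s = s[1:]
--     return True
-- ===== Notes on version B (the rewrite author's own statement) =====
-- stated objective: alternative
-- what changed: Replaces A's stateful counter-with-reset scan (and its dead passwd[curr]/passwd[prev] elif branch) by a sliding-window loop that slices each 6-character window and tests it with str.isnumeric.
import Mathlib
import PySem

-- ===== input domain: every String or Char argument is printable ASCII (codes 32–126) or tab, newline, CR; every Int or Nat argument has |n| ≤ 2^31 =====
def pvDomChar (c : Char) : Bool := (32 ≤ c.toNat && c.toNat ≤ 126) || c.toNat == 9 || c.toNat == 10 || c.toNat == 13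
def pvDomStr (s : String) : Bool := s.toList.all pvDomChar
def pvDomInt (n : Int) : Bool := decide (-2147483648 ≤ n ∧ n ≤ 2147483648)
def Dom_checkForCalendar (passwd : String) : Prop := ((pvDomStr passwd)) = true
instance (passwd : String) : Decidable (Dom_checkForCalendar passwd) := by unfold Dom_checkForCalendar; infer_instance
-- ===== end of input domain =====

-- B replaces A's counter/reset/early-return scan by a sliding 6-character-window check
-- (alternative decomposition, same linear cost up to the constant window factor).

-- ===== PORT A =====
-- elem.isnumeric(): on the printable-ASCII domain isnumeric coincides with isdigit ('0'–'9') — exact there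
def pvIsNum (c : Char) : Bool := PySem.Chars.isdigit c
-- passwd[curr].isnumeric(): indexing via PySem.Str.pyGet? (none = IndexError; in A the index is always in range)
def pvIdxNum (passwd : String) (i : Int) : Bool := (PySem.Str.pyGet? passwd i).elim false pvIsNum

def pvLoopA (passwd : String) : List Char → Int → Int → Int → Bool
  | [], _, _, _ => true
  | elem :: rest, numberCount, curr, prev =>
    let numberCount :=
      if pvIsNum elem then numberCount + 1
      else if pvIdxNum passwd curr && pvIdxNum passwd prev && decide (numberCount > 0) then numberCount + 1
      else if numberCount ≠ 6 then (0 : Int) else numberCount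
    if numberCount ≥ 6 then false
    else pvLoopA passwd rest numberCount (curr + 1) ((curr + 1) - 1)

def checkForCalendar (passwd : String) : Bool := pvLoopA passwd passwd.toList 0 0 0

-- ===== PORT B =====
-- while len(s) >= 6: … s = s[1:] — structural recursion on the code-point list;
-- s[:6] is 'List.take 6' and s[1:] is the tail (exact for these nonnegative literal bounds);
-- s[:6].isnumeric() on the printable-ASCII domain is PySem.Chars.strIsdigit — exact there
def pvWhileB : List Char → Bool
  | [] => true
  | c :: r =>
    if 6 ≤ (c :: r).length then
      if PySem.Chars.strIsdigit ((c :: r).take 6) then false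
      else pvWhileB r
    else true

def checkForCalendar_alt (passwd : String) : Bool := pvWhileB passwd.toList

-- ===== PRECONDITION & SPEC =====
def Spec_checkForCalendar (passwd : String) (out : Bool) : Prop := out = checkForCalendar_alt passwd
instance (passwd : String) (out : Bool) : Decidable (Spec_checkForCalendar passwd out) := by unfold Spec_checkForCalendar; infer_instance

-- ===== CLAIM (what is proved, stated in full; the proofs are below) =====
def Claim_equal_checkForCalendar : Prop := ∀ (passwd : String), Dom_checkForCalendar passwd → Spec_checkForCalendar passwd (checkForCalendar passwd)

-- ===== LEMMAS AND PROOFS =====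

-- A's loop with the dead elif removed: the counter is the length of the current trailing digit run
def pvSimple : List Char → Int → Bool
  | [], _ => true
  | c :: r, cnt =>
    let cnt' := if pvIsNum c then cnt + 1 else 0
    if 6 ≤ cnt' then false else pvSimple r cnt'

-- "the digit run continues: the next k characters exist and are all digits"
def pvCont (k : Nat) (l : List Char) : Bool :=
  decide (k ≤ l.length ∧ ∀ x ∈ l.take k, pvIsNum x = true)

lemma pvWhileB_short (l : List Char) (h : l.length < 6) : pvWhileB l = true := by
  cases l with
  | nil => rfl
  | cons c r =>
    have h6 : ¬ 6 ≤ (c :: r).length := by omega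
    have eW : pvWhileB (c :: r) =
        if 6 ≤ (c :: r).length then
          (if PySem.Chars.strIsdigit ((c :: r).take 6) = true then false else pvWhileB r)
        else true := rfl
    rw [eW, if_neg h6]

lemma pvCont_whileB (l : List Char) (h : pvCont 6 l = true) : pvWhileB l = false := by
  cases l with
  | nil => simp [pvCont] at h
  | cons c r =>
    simp only [pvCont, decide_eq_true_eq] at h
    have ht : (c :: r).take 6 = c :: r.take 5 := rfl
    have hwin : PySem.Chars.strIsdigit ((c :: r).take 6) = true := by
      rw [ht]
      simp only [PySem.Chars.strIsdigit, List.isEmpty_cons, Bool.not_false, Bool.true_and,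
        List.all_eq_true]
      intro x hx
      have := h.2 x (by rw [ht]; exact hx)
      simpa [pvIsNum] using this
    have hlen : 6 ≤ (c :: r).length := h.1
    have eW : pvWhileB (c :: r) =
        if 6 ≤ (c :: r).length then
          (if PySem.Chars.strIsdigit ((c :: r).take 6) = true then false else pvWhileB r)
        else true := rfl
    rw [eW, if_pos hlen, if_pos hwin]

lemma pvLoopA_eq_pvSimple (passwd : String) :
    ∀ (rest : List Char) (cnt : Int) (n : Nat) (prev : Int),
      passwd.toList.drop n = rest → 0 ≤ cnt → cnt < 6 →
      pvLoopA passwd rest cnt (n : Int) prev = pvSimple rest cnt := by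
  intro rest
  induction rest with
  | nil => intro cnt n prev _ _ _; rfl
  | cons c r ih =>
    intro cnt n prev hdrop hc0 hc6
    have hdrop' : passwd.toList.drop (n + 1) = r := by
      rw [← List.tail_drop, hdrop]
      rfl
    have hget : PySem.Str.pyGet? passwd ((n : Nat) : Int) = some c := by
      rw [PySem.Str.pyGet?_natCast, ← List.head?_drop, hdrop]
      rfl
    have hcast : ((n : Int) + 1) = (((n + 1 : Nat)) : Int) := by push_cast; ring
    by_cases hnum : pvIsNum c = true
    · have eA : pvLoopA passwd (c :: r) cnt (n : Int) prev =
          if cnt + 1 ≥ 6 then false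
          else pvLoopA passwd r (cnt + 1) ((n : Int) + 1) (((n : Int) + 1) - 1) := by
        simp [pvLoopA, hnum]
      have eS : pvSimple (c :: r) cnt =
          if 6 ≤ cnt + 1 then false else pvSimple r (cnt + 1) := by
        simp [pvSimple, hnum]
      rw [eA, eS]
      by_cases h6 : 6 ≤ cnt + 1
      · rw [if_pos (by omega : cnt + 1 ≥ 6), if_pos h6]
      · rw [if_neg (by omega : ¬ cnt + 1 ≥ 6), if_neg h6, hcast]
        exact ih (cnt + 1) (n + 1) _ hdrop' (by omega) (by omega)
    · have hidx : pvIdxNum passwd ((n : Nat) : Int) = false := by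
        simp only [pvIdxNum]
        rw [hget]
        simpa using hnum
      have eA : pvLoopA passwd (c :: r) cnt (n : Int) prev =
          pvLoopA passwd r 0 ((n : Int) + 1) (((n : Int) + 1) - 1) := by
        simp [pvLoopA, hnum, hidx, show cnt ≠ 6 by omega, show ¬ (0 : Int) ≥ 6 by omega]
      have eS : pvSimple (c :: r) cnt = pvSimple r 0 := by
        simp [pvSimple, hnum, show ¬ (6 : Int) ≤ 0 by omega]
      rw [eA, eS, hcast]
      exact ih 0 (n + 1) _ hdrop' le_rfl (by omega)

lemma pvSimple_eq (l : List Char) :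
    ∀ (cnt : Int), 0 ≤ cnt → cnt < 6 →
      pvSimple l cnt = (!pvCont (6 - cnt).toNat l && pvWhileB l) := by
  induction l with
  | nil =>
    intro cnt hc0 hc6
    have h1 : pvCont (6 - cnt).toNat [] = false := by
      simp only [pvCont, decide_eq_false_iff_not, not_and, List.length_nil]
      intro hle
      omega
    simp [pvSimple, pvWhileB, h1]
  | cons c r ih =>
    intro cnt hc0 hc6
    obtain ⟨k, hk⟩ : ∃ k : Nat, (6 - cnt).toNat = k + 1 := ⟨(5 - cnt).toNat, by omega⟩
    have eW : pvWhileB (c :: r) =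
        if 6 ≤ (c :: r).length then
          (if PySem.Chars.strIsdigit ((c :: r).take 6) = true then false else pvWhileB r)
        else true := rfl
    have ht : (c :: r).take 6 = c :: r.take 5 := rfl
    by_cases hnum : pvIsNum c = true
    · by_cases h6 : 6 ≤ cnt + 1
      · -- the run completes at this character: both sides are false
        have hcont : pvCont (6 - cnt).toNat (c :: r) = true := by
          have hk0 : (6 - cnt).toNat = 1 := by omega
          rw [hk0]
          simp only [pvCont, decide_eq_true_eq, List.length_cons]
          exact ⟨by omega, by simp [List.take_succ_cons, hnum]⟩
        have eS : pvSimple (c :: r) cnt = false := by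
          simp [pvSimple, hnum, show (6 : Int) ≤ cnt + 1 by omega]
        rw [eS, hcont]
        simp
      · have hk' : k = (6 - (cnt + 1)).toNat := by omega
        have hcont : pvCont (6 - cnt).toNat (c :: r) = pvCont (6 - (cnt + 1)).toNat r := by
          rw [hk, hk']
          apply decide_eq_decide.2
          constructor
          · rintro ⟨h1, h2⟩
            refine ⟨by simpa using h1, fun x hx => ?_⟩
            exact h2 x (by rw [List.take_succ_cons]; exact List.mem_cons_of_mem _ hx)
          · rintro ⟨h1, h2⟩
            refine ⟨by simpa using h1, fun x hx => ?_⟩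
            rw [List.take_succ_cons] at hx
            rcases List.mem_cons.1 hx with rfl | hx
            · exact hnum
            · exact h2 x hx
        have eS : pvSimple (c :: r) cnt = pvSimple r (cnt + 1) := by
          simp [pvSimple, hnum, show ¬ (6 : Int) ≤ cnt + 1 by omega]
        rw [eS, ih (cnt + 1) (by omega) (by omega), hcont]
        by_cases hlen : 6 ≤ (c :: r).length
        · by_cases hwin : PySem.Chars.strIsdigit ((c :: r).take 6) = true
          · -- front window all digits ⇒ the continuing-run test on r succeeds too
            have hwB : pvWhileB (c :: r) = false := by
              rw [eW, if_pos hlen, if_pos hwin]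
            have h5 : ∀ x ∈ r.take 5, pvIsNum x = true := by
              rw [ht] at hwin
              simp only [PySem.Chars.strIsdigit, List.isEmpty_cons, Bool.not_false,
                Bool.true_and, List.all_eq_true] at hwin
              intro x hx
              have := hwin x (List.mem_cons_of_mem _ hx)
              simpa [pvIsNum] using this
            have htail : pvCont (6 - (cnt + 1)).toNat r = true := by
              simp only [pvCont, decide_eq_true_eq]
              have hk5 : (6 - (cnt + 1)).toNat ≤ 5 := by omega
              refine ⟨?_, fun x hx => ?_⟩
              · have : 5 ≤ r.length := by
                  have := hlen
                  simp only [List.length_cons] at this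
                  omega
                omega
              · have hsub : r.take (6 - (cnt + 1)).toNat = (r.take 5).take (6 - (cnt + 1)).toNat := by
                  rw [List.take_take, Nat.min_eq_left hk5]
                rw [hsub] at hx
                exact h5 x (List.mem_of_mem_take hx)
            rw [hwB, htail]
            simp
          · have hwB : pvWhileB (c :: r) = pvWhileB r := by
              rw [eW, if_pos hlen, if_neg hwin]
            rw [hwB]
        · have h1 : pvWhileB (c :: r) = true := pvWhileB_short _ (by omega)
          have h2 : pvWhileB r = true := by
            refine pvWhileB_short _ ?_
            have : ¬ 6 ≤ r.length + 1 := by simpa using hlen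
            omega
          rw [h1, h2]
    · have hcont : pvCont (6 - cnt).toNat (c :: r) = false := by
        rw [hk]
        simp only [pvCont, decide_eq_false_iff_not, not_and]
        intro _ hall
        exact hnum (hall c (by rw [List.take_succ_cons]; exact List.mem_cons_self))
      have hwB : pvWhileB (c :: r) = pvWhileB r := by
        by_cases hlen : 6 ≤ (c :: r).length
        · have hwin : ¬ PySem.Chars.strIsdigit ((c :: r).take 6) = true := by
            rw [ht]
            simp only [PySem.Chars.strIsdigit, List.isEmpty_cons, Bool.not_false,
              Bool.true_and, List.all_eq_true]
            intro hall
            exact hnum (by simpa [pvIsNum] using hall c List.mem_cons_self)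
          rw [eW, if_pos hlen, if_neg hwin]
        · have h1 : pvWhileB (c :: r) = true := pvWhileB_short _ (by omega)
          have h2 : pvWhileB r = true := by
            refine pvWhileB_short _ ?_
            have : ¬ 6 ≤ r.length + 1 := by simpa using hlen
            omega
          rw [h1, h2]
      have eS : pvSimple (c :: r) cnt = pvSimple r 0 := by
        simp [pvSimple, hnum, show ¬ (6 : Int) ≤ 0 by omega]
      rw [eS, ih 0 le_rfl (by omega), hcont, hwB]
      simp only [Bool.not_false, Bool.true_and]
      have h60 : ((6 : Int) - 0).toNat = 6 := by omega
      rw [h60]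
      by_cases h0 : pvCont 6 r = true
      · rw [h0, pvCont_whileB r h0]
        simp
      · rw [Bool.not_eq_true] at h0
        rw [h0]
        simp

-- ===== VERDICT (by name: the statement is the Claim_ definition above) =====
theorem checkForCalendar_spec : Claim_equal_checkForCalendar := by
  intro passwd _
  unfold Spec_checkForCalendar checkForCalendar checkForCalendar_alt
  rw [show pvLoopA passwd passwd.toList 0 0 0 = pvSimple passwd.toList 0 from
        pvLoopA_eq_pvSimple passwd passwd.toList 0 0 0 rfl le_rfl (by omega),
      pvSimple_eq passwd.toList 0 le_rfl (by omega)]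
  have h60 : ((6 : Int) - 0).toNat = 6 := by omega
  rw [h60]
  by_cases h : pvCont 6 passwd.toList = true
  · rw [h, pvCont_whileB _ h]
    simp
  · rw [Bool.not_eq_true] at h
    rw [h]
    simp
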